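-- pv_equiv track=rewrite | github.com/raydatray/reetcode | py/lc/2021_brightest_position.py | brightest_position
-- ===== SOURCE A (Python) =====
-- from collections import defaultdict
-- from typing import Dict, List
--
-- def brightest_position(lights: List[List[int]]) -> int:
--     brightness: Dict[int, int] = defaultdict(int)
--
--     for idx, spread in lights:
--         brightness[idx - spread] += 1
--         brightness[idx + spread + 1] -= 1
--
--     curr_brightness, max_idx, max_brightness = 0, -1, 0
--
--     for idx, val in sorted(brightness.items()):
--         curr_brightness += val
--         if curr_brightness > max_brightness:
--             max_brightness = curr_brightness
--             max_idx = idx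
--
--     return max_idx
-- ===== SOURCE B (Python) =====
-- def brightest_position(lights):
--     starts = sorted(i - s for i, s in lights)
--     ends = sorted(i + s + 1 for i, s in lights)
--     n = len(lights)
--     si = ei = 0
--     curr = 0
--     max_idx, max_bright = -1, 0
--     while ei < n:
--         if si < n and starts[si] <= ends[ei]:
--             p = starts[si]
--         else:
--             p = ends[ei]
--         while si < n and starts[si] == p:
--             curr += 1
--             si += 1
--         while ei < n and ends[ei] == p:
--             curr -= 1
--             ei += 1
--         if curr > max_bright:
--             max_bright = curr
--             max_idx = p
--     return max_idx
-- ===== Notes on version B (the rewrite author's own statement) =====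
-- stated objective: alternative
-- what changed: A builds a defaultdict of +1/-1 deltas and sweeps sorted(dict.items()); B never builds a dict: it sorts the start positions and the end positions into two separate lists and merges them with two pointers, grouping all events at one coordinate before testing the running brightness.
-- outside the precondition, e.g. on brightest_position([[1, 2, 3]]): A raises ValueError, B raises ValueError
import Mathlib
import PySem

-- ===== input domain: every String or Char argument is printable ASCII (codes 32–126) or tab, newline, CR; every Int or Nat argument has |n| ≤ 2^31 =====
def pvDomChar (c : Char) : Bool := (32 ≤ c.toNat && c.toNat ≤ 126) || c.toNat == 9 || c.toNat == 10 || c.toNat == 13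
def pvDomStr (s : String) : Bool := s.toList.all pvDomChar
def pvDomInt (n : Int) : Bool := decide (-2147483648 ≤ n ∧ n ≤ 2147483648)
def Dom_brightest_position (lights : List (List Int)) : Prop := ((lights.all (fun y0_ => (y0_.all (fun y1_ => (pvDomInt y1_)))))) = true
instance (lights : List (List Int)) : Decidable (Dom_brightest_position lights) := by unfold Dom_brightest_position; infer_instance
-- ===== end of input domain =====

-- B replaces A's defaultdict-of-deltas + sorted(items) sweep by two separately sorted
-- start/end position lists merged with two pointers (grouping all events at one
-- coordinate before the max test); alternative decomposition, same observable result.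

-- ===== PORT A =====
-- destructuring of one row 'idx, spread = l' (shared by both ports; rows outside
-- Pre_ take the default)
def pvRow2 {α : Type} (l : List Int) (f : Int → Int → α) (dflt : α) : α :=
  match l with
  | [i, s] => f i s
  | _ => dflt

-- the body of A's second for-loop (state = (curr_brightness, max_idx, max_brightness))
def pvSweepStep (st : Int × Int × Int) (kv : Int × Int) : Int × Int × Int :=
  let curr := st.1 + kv.2
  if curr > st.2.2 then (curr, kv.1, curr) else (curr, st.2.1, st.2.2)

def brightest_position (lights : List (List Int)) : Int :=
  let brightness : PySem.Dict Int Int :=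
    lights.foldl (fun d l =>
      pvRow2 l (fun idx spread =>
          (d.modify (idx - spread) 0 (· + 1)).modify (idx + spread + 1) 0 (· - 1)) d)
      PySem.Dict.empty
  let final := (PySem.List.sorted2 brightness.items (fun p => p.1) (fun p => p.2)).foldl
      pvSweepStep (0, -1, 0)
  final.2.1

-- ===== PORT B =====
def pvRowStart (l : List Int) : Int := pvRow2 l (fun i s => i - s) 0
def pvRowEnd (l : List Int) : Int := pvRow2 l (fun i s => i + s + 1) 0

-- the two-pointer merge of Source B: consume every start/end equal to the next
-- coordinate p, then test the running brightness once
def pvMergeSweep : List Int → List Int → Int → Int → Int → Int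
  | _, [], _, _, maxIdx => maxIdx
  | ss, e :: es, curr, maxB, maxIdx =>
    let p : Int := match ss with
      | s :: _ => if s ≤ e then s else e
      | [] => e
    let curr' := curr + ((ss.takeWhile (· == p)).length : Int)
                      - (((e :: es).takeWhile (· == p)).length : Int)
    if curr' > maxB then
      pvMergeSweep (ss.dropWhile (· == p)) ((e :: es).dropWhile (· == p)) curr' curr' p
    else
      pvMergeSweep (ss.dropWhile (· == p)) ((e :: es).dropWhile (· == p)) curr' maxB maxIdx
  termination_by ss es => ss.length + es.length
  decreasing_by
    all_goals
      rcases ss with _ | ⟨s, ss2⟩ <;> dsimp only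
      · simp only [List.dropWhile_nil, List.length_nil, List.dropWhile_cons,
          beq_self_eq_true, if_true, List.length_cons]
        have := List.length_dropWhile_le (fun x => x == e) es
        omega
      · by_cases hse : s ≤ e
        · simp only [hse, dite_true, List.dropWhile_cons, beq_self_eq_true, if_true,
            List.length_cons]
          have h1 := List.length_dropWhile_le (fun x => x == s) ss2
          have h2 := List.length_dropWhile_le (fun x => x == s) (e :: es)
          have h3 := List.length_dropWhile_le (fun x => x == s) es
          simp only [List.length_cons] at h2
          split <;> (try simp only [List.length_cons]) <;> omega
        · simp only [hse, dite_false, List.dropWhile_cons, beq_self_eq_true, if_true,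
            List.length_cons]
          have h1 := List.length_dropWhile_le (fun x => x == e) (s :: ss2)
          have h2 := List.length_dropWhile_le (fun x => x == e) es
          have h3 := List.length_dropWhile_le (fun x => x == e) ss2
          simp only [List.length_cons] at h1
          split <;> (try simp only [List.length_cons]) <;> omega

def brightest_position_alt (lights : List (List Int)) : Int :=
  let starts := PySem.List.sorted (lights.map pvRowStart) (fun x => x)
  let ends := PySem.List.sorted (lights.map pvRowEnd) (fun x => x)
  pvMergeSweep starts ends 0 0 (-1)

-- ===== PRECONDITION & SPEC =====
-- Pre_ excludes rows that do not have exactly two entries: Python A raises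
-- ValueError unpacking 'idx, spread' there.
def Pre_brightest_position (lights : List (List Int)) : Prop :=
  ∀ l ∈ lights, l.length = 2
instance (lights : List (List Int)) : Decidable (Pre_brightest_position lights) := by
  unfold Pre_brightest_position; infer_instance

def pvWitness_brightest_position : List (List Int) := [[0, 1], [2, 0], [1, 3]]

def Spec_brightest_position (lights : List (List Int)) (out : Int) : Prop := out = brightest_position_alt lights
instance (lights : List (List Int)) (out : Int) : Decidable (Spec_brightest_position lights out) := by unfold Spec_brightest_position; infer_instance

-- ===== CLAIM (what is proved, stated in full; the proofs are below) =====
def Claim_equal_brightest_position : Prop := ∀ (lights : List (List Int)), Dom_brightest_position lights → Pre_brightest_position lights → Spec_brightest_position lights (brightest_position lights)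

-- ===== LEMMAS AND PROOFS =====

def pvEvents (lights : List (List Int)) : List Int :=
  lights.flatMap (fun l => [pvRowStart l, pvRowEnd l])


def pvBuild (lights : List (List Int)) (d : PySem.Dict Int Int) : PySem.Dict Int Int :=
  lights.foldl (fun d l =>
    pvRow2 l (fun idx spread =>
        (d.modify (idx - spread) 0 (· + 1)).modify (idx + spread + 1) 0 (· - 1)) d) d


lemma pvBuild_getD (lights : List (List Int)) (hrows : ∀ l ∈ lights, l.length = 2) :
    ∀ (d : PySem.Dict Int Int) (p : Int),
      (pvBuild lights d).getD p 0 =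
        d.getD p 0 + ((lights.map pvRowStart).count p : Int)
                   - ((lights.map pvRowEnd).count p : Int) := by
  induction lights with
  | nil => intro d p; simp [pvBuild]
  | cons l rest ih =>
    intro d p
    obtain ⟨i, s, rfl⟩ : ∃ i s, l = [i, s] := by
      have h2 := hrows l (by simp)
      match l, h2 with
      | [a, b], _ => exact ⟨a, b, rfl⟩
    have hrest : ∀ l ∈ rest, l.length = 2 := fun l hl => hrows l (by simp [hl])
    have hstep : pvBuild ([i, s] :: rest) d
        = pvBuild rest ((d.modify (i - s) 0 (· + 1)).modify (i + s + 1) 0 (· - 1)) := rfl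
    rw [hstep, ih hrest]
    have hne : (i - s) ≠ (i + s + 1) := by omega
    simp only [PySem.Dict.getD_modify, List.map_cons, List.count_cons, pvRowStart,
      pvRowEnd, pvRow2, beq_iff_eq]
    split_ifs <;> subst_vars <;> push_cast <;> omega


lemma pvKeys_modify_add (d : PySem.Dict Int Int) (k : Int) (d0 : Int) (f : Int → Int) :
    (d.modify k d0 f).keys = PySem.Set.add d.keys k := by
  rw [PySem.Dict.keys_modify]
  by_cases h : d.contains k = true
  · rw [PySem.Dict.keys_insert_of_contains _ _ h]
    rw [PySem.Dict.contains_eq_decide_mem_keys] at h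
    simp only [decide_eq_true_eq] at h
    simp [PySem.Set.add, PySem.Set.contains, h]
  · rw [PySem.Dict.keys_insert_of_not_contains _ _ (by simpa using h)]
    rw [PySem.Dict.contains_eq_decide_mem_keys] at h
    simp only [decide_eq_true_eq] at h
    simp [PySem.Set.add, PySem.Set.contains, h]


lemma pvBuild_keys (lights : List (List Int)) (hrows : ∀ l ∈ lights, l.length = 2) :
    ∀ (d : PySem.Dict Int Int),
      (pvBuild lights d).keys = PySem.Set.update d.keys (pvEvents lights) := by
  induction lights with
  | nil => intro d; simp [pvBuild, pvEvents, PySem.Set.update]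
  | cons l rest ih =>
    intro d
    obtain ⟨i, s, rfl⟩ : ∃ i s, l = [i, s] := by
      have h2 := hrows l (by simp)
      match l, h2 with
      | [a, b], _ => exact ⟨a, b, rfl⟩
    have hrest : ∀ l ∈ rest, l.length = 2 := fun l hl => hrows l (by simp [hl])
    have hstep : pvBuild ([i, s] :: rest) d
        = pvBuild rest ((d.modify (i - s) 0 (· + 1)).modify (i + s + 1) 0 (· - 1)) := rfl
    rw [hstep, ih hrest, pvKeys_modify_add, pvKeys_modify_add]
    simp [pvEvents, PySem.Set.update, pvRowStart, pvRowEnd, pvRow2]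


lemma pvBuild_keys_empty (lights : List (List Int)) (hrows : ∀ l ∈ lights, l.length = 2) :
    (pvBuild lights PySem.Dict.empty).keys = PySem.Set.ofList (pvEvents lights) := by
  rw [pvBuild_keys lights hrows, PySem.Dict.keys_empty, PySem.Set.ofList_eq_foldl]
  rfl


lemma pvItems_eq_keys_map (d : PySem.Dict Int Int) (h : d.keys.Nodup) :
    d.items = d.keys.map (fun k => (k, d.getD k 0)) := by
  have hk : d.keys = d.items.map (fun p => p.1) := by simp only [PySem.Dict.keys]
  rw [hk, List.map_map]
  conv_lhs => rw [← List.map_id d.items]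
  apply List.map_congr_left
  intro p hp
  have := PySem.Dict.getD_of_mem_items (d := d) (k := p.1) (v := p.2) (by simpa using hp) h 0
  simp [Function.comp, this]


lemma pvInsertBy_congr (p q : (Int × Int) → (Int × Int) → Bool) (x : Int × Int)
    (acc : List (Int × Int)) (h : ∀ b ∈ acc, p x b = q x b) :
    PySem.List.insertBy p x acc = PySem.List.insertBy q x acc := by
  induction acc with
  | nil => rfl
  | cons y ys ih =>
    have hxy : p x y = q x y := h y (by simp)
    simp only [PySem.List.insertBy, hxy]
    split
    · rfl
    · have := ih (fun b hb => h b (by simp [hb]))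
      rw [this]


lemma pvFoldl_insertBy_congr (p q : (Int × Int) → (Int × Int) → Bool)
    (xs : List (Int × Int)) :
    ∀ (acc : List (Int × Int)),
    (∀ a, (a ∈ xs ∨ a ∈ acc) → ∀ b, (b ∈ xs ∨ b ∈ acc) → p a b = q a b) →
    xs.foldl (fun acc x => PySem.List.insertBy p x acc) acc
      = xs.foldl (fun acc x => PySem.List.insertBy q x acc) acc := by
  induction xs with
  | nil => intro acc _; rfl
  | cons x xs ih =>
    intro acc h
    simp only [List.foldl_cons]
    rw [pvInsertBy_congr p q x acc (fun b hb => h x (by simp) b (Or.inr hb))]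
    apply ih
    intro a ha b hb
    have key : ∀ c : ℤ × ℤ, (c ∈ xs ∨ c ∈ PySem.List.insertBy q x acc) → (c ∈ x :: xs ∨ c ∈ acc) := by
      intro c hc
      rcases hc with hc | hc
      · exact Or.inl (by simp [hc])
      · rcases (PySem.List.mem_insertBy (before := q) (x := x) (ys := acc) (y := c)).1 hc with rfl | h'
        · exact Or.inl (by simp)
        · exact Or.inr h'
    exact h a (key a ha) b (key b hb)


lemma pvSorted2_eq_sorted_fst (xs : List (Int × Int))
    (hinj : ∀ a ∈ xs, ∀ b ∈ xs, a.1 = b.1 → a = b) :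
    PySem.List.sorted2 xs (fun p => p.1) (fun p => p.2)
      = PySem.List.sorted xs (fun p => p.1) := by
  show xs.foldl _ [] = xs.foldl _ []
  apply pvFoldl_insertBy_congr
  intro a ha b hb
  simp only [List.mem_nil_iff, or_false] at ha hb
  by_cases hab : a.1 < b.1
  · simp [hab]
  · by_cases hba : b.1 < a.1
    · simp [hab, hba]
    · have : a = b := hinj a ha b hb (le_antisymm (not_lt.1 hba) (not_lt.1 hab))
      subst this
      simp


lemma pvSweep_skip (L : List (Int × Int)) :
    ∀ (curr maxB maxI : Int),
    (∀ kv ∈ L, 0 ≤ kv.2) → curr + (L.map (fun kv => kv.2)).sum ≤ 0 →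
    0 ≤ maxB →
    (L.foldl pvSweepStep (curr, maxI, maxB)).2.1 = maxI := by
  induction L with
  | nil => intro curr maxB maxI _ _ _; rfl
  | cons kv L ih =>
    intro curr maxB maxI h0 h1 h2
    have hrest : 0 ≤ (L.map (fun kv => kv.2)).sum := by
      apply List.sum_nonneg
      intro x hx
      obtain ⟨kv', hkv', rfl⟩ := List.mem_map.1 hx
      exact h0 kv' (by simp [hkv'])
    simp only [List.map_cons, List.sum_cons] at h1
    have hcur : curr + kv.2 ≤ 0 := by omega
    simp only [List.foldl_cons, pvSweepStep]
    rw [if_neg (by omega)]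
    exact ih (curr + kv.2) maxB maxI (fun kv' h => h0 kv' (by simp [h])) (by omega) h2


lemma pvSum_counts (K : List Int) (hK : K.Nodup) :
    ∀ (ss : List Int), (∀ x ∈ ss, x ∈ K) →
      (K.map (fun k => ((ss.count k : Nat) : Int))).sum = (ss.length : Int) := by
  induction K with
  | nil =>
    intro ss h
    have : ss = [] := by
      rcases ss with _ | ⟨x, t⟩
      · rfl
      · exact absurd (h x (by simp)) (by simp)
    subst this; simp
  | cons k K ih =>
    intro ss h
    have hk : k ∉ K := (List.nodup_cons.1 hK).1
    have hK' : K.Nodup := (List.nodup_cons.1 hK).2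
    have hfil : ∀ k' ∈ K, ss.count k' = (ss.filter (fun x => x ≠ k)).count k' := by
      intro k' hk'
      have hne : k' ≠ k := fun hh => hk (hh ▸ hk')
      rw [List.count_filter]
      simp [hne]
    have hcov : ∀ x ∈ ss.filter (fun x => x ≠ k), x ∈ K := by
      intro x hx
      have hm := List.mem_of_mem_filter hx
      have hp := List.of_mem_filter hx
      simp only [ne_eq, decide_not, Bool.not_eq_true', decide_eq_false_iff_not] at hp
      rcases List.mem_cons.1 (h x hm) with rfl | h2
      · exact absurd rfl hp
      · exact h2
    have hlen : (ss.count k : Int) + ((ss.filter (fun x => x ≠ k)).length : Int)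
        = (ss.length : Int) := by
      have := List.length_eq_countP_add_countP (fun x => x == k) (l := ss)
      have hc : ss.count k = ss.countP (fun x => x == k) := by simp [List.count]
      have hf : (ss.filter (fun x => x ≠ k)).length = ss.countP (fun x => decide ¬((x == k) = true)) := by
        rw [List.countP_eq_length_filter]
        congr 1
        apply List.filter_congr
        intro x _
        simp
      rw [hc, hf]
      omega
    simp only [List.map_cons, List.sum_cons]
    rw [List.map_congr_left (fun k' hk' => by rw [hfil k' hk']), ih hK' _ hcov]
    omega


lemma pvSplit_min (p : Int) (ss : List Int) (hs : ss.Pairwise (· ≤ ·))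
    (hmin : ∀ x ∈ ss, p ≤ x) :
    ((ss.takeWhile (· == p)).length = ss.count p)
    ∧ ((ss.dropWhile (· == p)).count p = 0)
    ∧ (∀ q, q ≠ p → (ss.dropWhile (· == p)).count q = ss.count q)
    ∧ (ss.dropWhile (· == p)).Pairwise (· ≤ ·)
    ∧ (∀ x ∈ ss.dropWhile (· == p), x ∈ ss)
    ∧ ss.length = (ss.takeWhile (· == p)).length + (ss.dropWhile (· == p)).length := by
  have htake : ∀ x ∈ ss.takeWhile (· == p), x = p := by
    intro x hx
    have := List.mem_takeWhile_imp hx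
    simpa using this
  have hsub : (ss.dropWhile (· == p)).Sublist ss := List.dropWhile_sublist _
  have hdropmem : ∀ x ∈ ss.dropWhile (· == p), x ∈ ss := fun x hx => hsub.mem hx
  have hnot : p ∉ ss.dropWhile (· == p) := by
    intro hp
    rcases hd : ss.dropWhile (· == p) with _ | ⟨y, rest⟩
    · rw [hd] at hp; simp at hp
    · have hy : ¬ (y == p) = true := by
        have := List.head?_dropWhile_not (fun x => x == p) ss
        rw [hd] at this
        simpa using this
      have hyne : y ≠ p := by simpa using hy
      rw [hd] at hp
      rcases List.mem_cons.1 hp with rfl | hp2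
      · exact hyne rfl
      · -- y ≤ p from sortedness, p ≤ y from hmin → y = p, contra
        have hpair : (ss.dropWhile (· == p)).Pairwise (· ≤ ·) := hs.sublist hsub
        rw [hd] at hpair
        have hyp : y ≤ p := (List.pairwise_cons.1 hpair).1 p hp2
        have hpy : p ≤ y := hmin y (hdropmem y (by rw [hd]; simp))
        exact hyne (le_antisymm hyp hpy)
  have hcnt0 : (ss.dropWhile (· == p)).count p = 0 := List.count_eq_zero.2 hnot
  have hsplit : ss.takeWhile (· == p) ++ ss.dropWhile (· == p) = ss :=
    List.takeWhile_append_dropWhile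
  have hcnttake : (ss.takeWhile (· == p)).count p = (ss.takeWhile (· == p)).length := by
    apply List.count_eq_length.2
    intro x hx
    exact (htake x hx).symm
  refine ⟨?_, hcnt0, ?_, hs.sublist hsub, hdropmem, ?_⟩
  · conv_rhs => rw [← hsplit]
    rw [List.count_append, hcnttake, hcnt0]
    omega
  · intro q hq
    conv_rhs => rw [← hsplit]
    rw [List.count_append]
    have : (ss.takeWhile (· == p)).count q = 0 := by
      apply List.count_eq_zero.2
      intro hqmem
      exact hq (htake q hqmem)
    omega
  · conv_lhs => rw [← hsplit]
    rw [List.length_append]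


lemma pvMergeSweep_nil (ss : List Int) (curr maxB maxI : Int) :
    pvMergeSweep ss [] curr maxB maxI = maxI := by
  rw [pvMergeSweep.eq_def]


lemma pvMergeSweep_cons_eq (ss es2 : List Int) (e curr maxB maxI p : Int)
    (hp : (match ss with | s :: _ => if s ≤ e then s else e | [] => e) = p) :
    pvMergeSweep ss (e :: es2) curr maxB maxI =
      if curr + ((ss.takeWhile (· == p)).length : Int)
            - (((e :: es2).takeWhile (· == p)).length : Int) > maxB then
        pvMergeSweep (ss.dropWhile (· == p)) ((e :: es2).dropWhile (· == p))
          (curr + ((ss.takeWhile (· == p)).length : Int)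
            - (((e :: es2).takeWhile (· == p)).length : Int))
          (curr + ((ss.takeWhile (· == p)).length : Int)
            - (((e :: es2).takeWhile (· == p)).length : Int)) p
      else
        pvMergeSweep (ss.dropWhile (· == p)) ((e :: es2).dropWhile (· == p))
          (curr + ((ss.takeWhile (· == p)).length : Int)
            - (((e :: es2).takeWhile (· == p)).length : Int))
          maxB maxI := by
  conv_lhs => rw [pvMergeSweep.eq_def]
  dsimp only
  rw [hp]


lemma pvHead_min (k e : Int) (ss es2 : List Int)
    (hss : ss.Pairwise (· ≤ ·)) (hes : (e :: es2).Pairwise (· ≤ ·))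
    (hmemk : k ∈ ss ∨ k ∈ e :: es2)
    (hkmin : ∀ x, (x ∈ ss ∨ x ∈ e :: es2) → k ≤ x) :
    (match ss with | s :: _ => if s ≤ e then s else e | [] => e) = k := by
  rcases ss with _ | ⟨s, ss2⟩
  · show e = k
    have hke : k ≤ e := hkmin e (Or.inr (by simp))
    have hkmem : k ∈ e :: es2 := by
      rcases hmemk with h | h
      · simp at h
      · exact h
    have hek : e ≤ k := by
      rcases List.mem_cons.1 hkmem with rfl | h2
      · exact le_refl k
      · exact (List.pairwise_cons.1 hes).1 k h2
    omega
  · show (if s ≤ e then s else e) = k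
    have hke : k ≤ e := hkmin e (Or.inr (by simp))
    have hks : k ≤ s := hkmin s (Or.inl (by simp))
    have hsk : s ≤ k ∨ e ≤ k := by
      rcases hmemk with h | h
      · left
        rcases List.mem_cons.1 h with rfl | h2
        · exact le_refl k
        · exact (List.pairwise_cons.1 hss).1 k h2
      · right
        rcases List.mem_cons.1 h with rfl | h2
        · exact le_refl k
        · exact (List.pairwise_cons.1 hes).1 k h2
    by_cases hse : s ≤ e <;> simp only [hse, if_true, if_false] <;> omega


lemma pvMerge_eq (K : List Int) :
    ∀ (ss es : List Int) (curr maxB maxI : Int),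
      K.Pairwise (· < ·) →
      ss.Pairwise (· ≤ ·) → es.Pairwise (· ≤ ·) →
      (∀ p : Int, p ∈ K ↔ (p ∈ ss ∨ p ∈ es)) →
      curr = (es.length : Int) - (ss.length : Int) →
      0 ≤ maxB →
      pvMergeSweep ss es curr maxB maxI
        = ((K.map (fun k => (k, ((ss.count k : Nat) : Int) - ((es.count k : Nat) : Int)))).foldl
            pvSweepStep (curr, maxI, maxB)).2.1 := by
  induction K with
  | nil =>
    intro ss es curr maxB maxI _ _ _ hmem _ _
    have hss : ss = [] := by
      rcases ss with _ | ⟨x, t⟩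
      · rfl
      · exact absurd ((hmem x).2 (Or.inl (by simp))) (by simp)
    have hes : es = [] := by
      rcases es with _ | ⟨x, t⟩
      · rfl
      · exact absurd ((hmem x).2 (Or.inr (by simp))) (by simp)
    subst hss; subst hes
    rw [pvMergeSweep_nil]
    simp
  | cons k K ih =>
    intro ss es curr maxB maxI hK hss hes hmem hcurr hmaxB
    have hKk : ∀ x ∈ K, k < x := (List.pairwise_cons.1 hK).1
    have hK' : K.Pairwise (· < ·) := (List.pairwise_cons.1 hK).2
    have hkmin : ∀ x, (x ∈ ss ∨ x ∈ es) → k ≤ x := by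
      intro x hx
      rcases List.mem_cons.1 ((hmem x).2 hx) with rfl | h2
      · exact le_refl x
      · exact le_of_lt (hKk x h2)
    rcases hesc : es with _ | ⟨e, es2⟩
    · -- ends exhausted: merge returns maxI, and the remaining sweep never updates max_idx
      subst hesc
      rw [pvMergeSweep_nil]
      rw [pvSweep_skip]
      · intro kv hkv
        obtain ⟨k', _, rfl⟩ := List.mem_map.1 hkv
        simp
      · have hsum : ((k :: K).map (fun k' => ((ss.count k' : Nat) : Int))).sum
            = (ss.length : Int) := by
          apply pvSum_counts
          · exact (List.pairwise_cons.2 ⟨hKk, hK'⟩).imp (fun h => ne_of_lt h)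
          · intro x hx; exact (hmem x).2 (Or.inl hx)
        have hmapsnd : (((k :: K).map (fun k' => (k', ((ss.count k' : Nat) : Int)
              - ((([] : List Int).count k' : Nat) : Int)))).map (fun kv => kv.2))
            = (k :: K).map (fun k' => ((ss.count k' : Nat) : Int)) := by
          simp [List.map_map, Function.comp]
        rw [hmapsnd, hsum]
        simp only [List.length_nil, Nat.cast_zero] at hcurr
        omega
      · exact hmaxB
    · -- es = e :: es2
      subst hesc
      have hkm := pvHead_min k e ss es2 hss hes ((hmem k).1 (by simp)) hkmin
      rw [pvMergeSweep_cons_eq ss es2 e curr maxB maxI k hkm]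
      -- split facts for both lists
      obtain ⟨st1, sd0, sdq, sdp, sdm, slen⟩ :=
        pvSplit_min k ss hss (fun x hx => hkmin x (Or.inl hx))
      obtain ⟨et1, ed0, edq, edp, edm, elen⟩ :=
        pvSplit_min k (e :: es2) hes (fun x hx => hkmin x (Or.inr hx))
      -- the RHS head step
      simp only [List.map_cons, List.foldl_cons]
      have hstep : pvSweepStep (curr, maxI, maxB)
            (k, ((ss.count k : Nat) : Int) - (((e :: es2).count k : Nat) : Int))
          = (curr + ((ss.takeWhile (· == k)).length : Int)
              - (((e :: es2).takeWhile (· == k)).length : Int),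
             if curr + ((ss.takeWhile (· == k)).length : Int)
              - (((e :: es2).takeWhile (· == k)).length : Int) > maxB then
               (k, curr + ((ss.takeWhile (· == k)).length : Int)
              - (((e :: es2).takeWhile (· == k)).length : Int))
             else (maxI, maxB)) := by
        have harith : curr + (((ss.count k : Nat) : Int) - (((e :: es2).count k : Nat) : Int))
            = curr + ((ss.takeWhile (· == k)).length : Int)
              - (((e :: es2).takeWhile (· == k)).length : Int) := by
          rw [st1, et1]; ring
        simp only [pvSweepStep]
        rw [harith]
        split_ifs <;> rfl
      rw [hstep]
      have hne' : ∀ q ∈ K, q ≠ k := fun q hq h => lt_irrefl k (h ▸ hKk q hq)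
      have hmem' : ∀ q : Int, q ∈ K ↔ (q ∈ ss.dropWhile (· == k) ∨ q ∈ (e :: es2).dropWhile (· == k)) := by
        intro q
        constructor
        · intro hq
          have hqk : q ≠ k := hne' q hq
          rcases (hmem q).1 (by simp [hq]) with h | h
          · left
            have hc : ss.count q ≠ 0 := by
              intro h0
              exact absurd h (List.count_eq_zero.1 h0)
            have := sdq q hqk
            have : (ss.dropWhile (· == k)).count q ≠ 0 := by omega
            by_contra hnm
            exact this (List.count_eq_zero.2 hnm)
          · right
            have hc : (e :: es2).count q ≠ 0 := by
              intro h0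
              exact absurd h (List.count_eq_zero.1 h0)
            have := edq q hqk
            have : ((e :: es2).dropWhile (· == k)).count q ≠ 0 := by omega
            by_contra hnm
            exact this (List.count_eq_zero.2 hnm)
        · intro hq
          have hqk : q ≠ k := by
            rintro rfl
            rcases hq with hq | hq
            · exact absurd (List.count_eq_zero.1 sd0) (by simp [hq])
            · exact absurd (List.count_eq_zero.1 ed0) (by simp [hq])
          rcases hq with hq | hq
          · rcases List.mem_cons.1 ((hmem q).2 (Or.inl (sdm q hq))) with rfl | h
            · exact absurd rfl hqk
            · exact h
          · rcases List.mem_cons.1 ((hmem q).2 (Or.inr (edm q hq))) with rfl | h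
            · exact absurd rfl hqk
            · exact h
      have hcount' : K.map (fun k' => (k', ((ss.count k' : Nat) : Int)
              - (((e :: es2).count k' : Nat) : Int)))
          = K.map (fun k' => (k', (((ss.dropWhile (· == k)).count k' : Nat) : Int)
              - ((((e :: es2).dropWhile (· == k)).count k' : Nat) : Int))) := by
        apply List.map_congr_left
        intro q hq
        rw [sdq q (hne' q hq), edq q (hne' q hq)]
      rw [hcount']
      have hcurr' : curr + ((ss.takeWhile (· == k)).length : Int)
            - (((e :: es2).takeWhile (· == k)).length : Int)
          = ((((e :: es2).dropWhile (· == k)).length : Nat) : Int)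
            - (((ss.dropWhile (· == k)).length : Nat) : Int) := by
        omega
      split_ifs with hgt
      · rw [ih _ _ _ _ _ hK' sdp edp hmem' hcurr' (by omega)]
      · rw [ih _ _ _ _ _ hK' sdp edp hmem' hcurr' hmaxB]

-- ===== VERDICT (by name: the statement is the Claim_ definition above) =====
theorem brightest_position_spec : Claim_equal_brightest_position := by
  intro lights _hdom hpre
  unfold Spec_brightest_position
  have hA : brightest_position lights
      = ((PySem.List.sorted2 (pvBuild lights PySem.Dict.empty).items
            (fun p => p.1) (fun p => p.2)).foldl pvSweepStep (0, -1, 0)).2.1 := rfl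
  have hB : brightest_position_alt lights
      = pvMergeSweep (PySem.List.sorted (lights.map pvRowStart) (fun x => x))
          (PySem.List.sorted (lights.map pvRowEnd) (fun x => x)) 0 0 (-1) := rfl
  rw [hA, hB]
  have hkeys := pvBuild_keys_empty lights hpre
  have hnodup : (pvBuild lights PySem.Dict.empty).keys.Nodup := by
    rw [hkeys]; exact PySem.Set.nodup_ofList _
  have hitems : (pvBuild lights PySem.Dict.empty).items
      = (PySem.Set.ofList (pvEvents lights)).map
          (fun k => (k, (((lights.map pvRowStart).count k : Nat) : Int)
            - (((lights.map pvRowEnd).count k : Nat) : Int))) := by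
    rw [pvItems_eq_keys_map _ hnodup, hkeys]
    apply List.map_congr_left
    intro k _
    rw [pvBuild_getD lights hpre PySem.Dict.empty k, PySem.Dict.getD_empty]
    simp
  have hinj : ∀ a ∈ (pvBuild lights PySem.Dict.empty).items,
      ∀ b ∈ (pvBuild lights PySem.Dict.empty).items, a.1 = b.1 → a = b := by
    rw [hitems]
    rintro a ha b hb hab
    obtain ⟨k, _, rfl⟩ := List.mem_map.1 ha
    obtain ⟨k', _, rfl⟩ := List.mem_map.1 hb
    simp only at hab
    subst hab
    rfl
  rw [pvSorted2_eq_sorted_fst _ hinj]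
  have hsorted : PySem.List.sorted (pvBuild lights PySem.Dict.empty).items (fun p => p.1)
      = (PySem.List.sorted (PySem.Set.ofList (pvEvents lights)) (fun x => x)).map
          (fun k => (k, (((lights.map pvRowStart).count k : Nat) : Int)
            - (((lights.map pvRowEnd).count k : Nat) : Int))) := by
    apply PySem.List.sorted_eq_of_perm_of_pairwise_lt
    · rw [hitems]
      exact (PySem.List.sorted_perm _ _ _).map _
    · rw [List.pairwise_map]
      have := PySem.List.sorted_ofList_pairwise_lt (xs := pvEvents lights)
      simpa using this
  rw [hsorted]
  have hcntS : ∀ k : Int, (PySem.List.sorted (lights.map pvRowStart) (fun x => x)).count k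
      = (lights.map pvRowStart).count k :=
    fun k => (PySem.List.sorted_perm _ _ _).count_eq k
  have hcntE : ∀ k : Int, (PySem.List.sorted (lights.map pvRowEnd) (fun x => x)).count k
      = (lights.map pvRowEnd).count k :=
    fun k => (PySem.List.sorted_perm _ _ _).count_eq k
  rw [pvMerge_eq (PySem.List.sorted (PySem.Set.ofList (pvEvents lights)) (fun x => x))]
  · have hmaps : (PySem.List.sorted (PySem.Set.ofList (pvEvents lights)) (fun x => x)).map
        (fun k => (k,
          (((PySem.List.sorted (lights.map pvRowStart) (fun x => x)).count k : Nat) : Int)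
          - (((PySem.List.sorted (lights.map pvRowEnd) (fun x => x)).count k : Nat) : Int)))
        = (PySem.List.sorted (PySem.Set.ofList (pvEvents lights)) (fun x => x)).map
        (fun k => (k, (((lights.map pvRowStart).count k : Nat) : Int)
          - (((lights.map pvRowEnd).count k : Nat) : Int))) :=
      List.map_congr_left (fun k _ => by rw [hcntS k, hcntE k])
    rw [hmaps]
  · exact PySem.List.sorted_ofList_pairwise_lt _
  · have := PySem.List.sorted_pairwise (lights.map pvRowStart) (fun x => x)
    simpa using this
  · have := PySem.List.sorted_pairwise (lights.map pvRowEnd) (fun x => x)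
    simpa using this
  · intro p
    simp only [PySem.List.mem_sorted, PySem.Set.mem_ofList, pvEvents, List.mem_flatMap,
      List.mem_map, List.mem_cons, List.mem_nil_iff]
    constructor
    · rintro ⟨l, hl, rfl | (rfl | h)⟩
      · exact Or.inl ⟨l, hl, rfl⟩
      · exact Or.inr ⟨l, hl, rfl⟩
      · exact absurd h (by simp)
    · rintro (⟨l, hl, rfl⟩ | ⟨l, hl, rfl⟩)
      · exact ⟨l, hl, Or.inl rfl⟩
      · exact ⟨l, hl, Or.inr (Or.inl rfl)⟩
  · simp [PySem.List.length_sorted]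
  · exact le_refl 0
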